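-- pv_equiv track=rewrite | github.com/jj1985/autonomous-dev | tests/regression/smoke/test_permission_glob_syntax.py | _check_colon_star_at_end
-- ===== SOURCE A (Python) =====
-- def _check_colon_star_at_end(rule: str) -> bool:
--     """Check that :* in a deny rule is only at the end of the pattern.
--
--     Claude Code's Tool(command:pattern) syntax requires that :* appears
--     only at the END of the pattern. Having content after :* (e.g.,
--     "Bash(npm:*install*-g*)") causes the rule to be skipped as invalid.
--
--     The :* must be followed only by the closing ) or end of string.
--     Patterns like "Bash(npm:*)" are valid. Patterns like "Bash(npm:*foo*)"
--     are invalid.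
--
--     Args:
--         rule: The deny rule string
--
--     Returns:
--         True if the rule is valid (no content after :*), False otherwise
--     """
--     # Find all occurrences of :* in the rule
--     idx = 0
--     while True:
--         pos = rule.find(":*", idx)
--         if pos == -1:
--             break
--         # Check what follows :* — only ) or " or end-of-string is valid
--         after_pos = pos + 2
--         if after_pos < len(rule):
--             next_char = rule[after_pos]
--             if next_char not in (")", '"'):
--                 return False
--         idx = after_pos
--     return True
-- ===== SOURCE B (Python) =====
-- def _check_colon_star_at_end(rule: str) -> bool:
--     """Split once on ":*"; every piece after a boundary must start with ')' or '"',
--     except that the last piece may be empty (":*" at end of string)."""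
--     parts = rule.split(":*")
--     for i, part in enumerate(parts[1:], start=1):
--         if not part:
--             return i == len(parts) - 1
--         if part[0] not in (")", '"'):
--             return False
--     return True
-- ===== Notes on version B (the rewrite author's own statement) =====
-- stated objective: simpler
-- what changed: Replaces the index-advancing rule.find(":*", idx) while-loop with a single rule.split(":*") followed by one pass over the pieces after each boundary (non-empty piece must start with ')' or '"', empty piece only valid when last).
import Mathlib
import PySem

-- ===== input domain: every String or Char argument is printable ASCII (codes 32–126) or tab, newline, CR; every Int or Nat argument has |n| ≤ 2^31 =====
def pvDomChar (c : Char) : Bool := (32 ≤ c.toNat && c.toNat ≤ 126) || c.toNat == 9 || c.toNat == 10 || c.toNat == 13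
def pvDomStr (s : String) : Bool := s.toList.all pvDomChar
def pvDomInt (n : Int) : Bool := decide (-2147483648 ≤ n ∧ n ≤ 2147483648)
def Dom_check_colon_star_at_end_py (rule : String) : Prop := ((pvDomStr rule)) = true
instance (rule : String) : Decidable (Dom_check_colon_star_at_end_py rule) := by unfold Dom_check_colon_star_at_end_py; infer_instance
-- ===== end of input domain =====

-- B replaces A's index-advancing find loop by one split on ":*" plus a single pass
-- over the resulting pieces (objective: simpler decomposition, same cost).

-- ===== PORT A =====
-- the while loop of A: idx advances to pos + 2 after each found ":*";
-- fuel is only a totality guard (idx strictly increases and stays ≤ length,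
-- so length + 2 iterations always suffice; proved in pvALoop_eq_ok below)
def pvALoop (rule : List Char) (fuel : Nat) (idx : Nat) : Bool :=
  match fuel with
  | 0 => true
  | fuel + 1 =>
    let pos := PySem.Chars.findFrom rule [':', '*'] (idx : Int) none
    if pos = -1 then true
    else
      let after := pos.toNat + 2
      if h2 : after < rule.length then
        let next := rule[after]'h2
        if !(next = ')' || next = '"') then false
        else pvALoop rule fuel after
      else pvALoop rule fuel after

def check_colon_star_at_end_py (rule : String) : Bool :=
  pvALoop rule.toList (rule.toList.length + 2) 0

-- ===== PORT B =====
-- the pass over parts[1:]: an empty piece is valid only when it is the last one,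
-- a non-empty piece must start with ')' or '"'
def pvBGo : List (List Char) → Bool
  | [] => true
  | p :: rest =>
    match p with
    | [] => rest.isEmpty
    | c :: _ => if c = ')' || c = '"' then pvBGo rest else false

def check_colon_star_at_end_py_alt (rule : String) : Bool :=
  let parts := PySem.Chars.splitOn rule.toList [':', '*']   -- rule.split(":*")
  pvBGo (parts.drop 1)

-- ===== PRECONDITION & SPEC =====
def Spec_check_colon_star_at_end_py (rule : String) (out : Bool) : Prop := out = check_colon_star_at_end_py_alt rule
instance (rule : String) (out : Bool) : Decidable (Spec_check_colon_star_at_end_py rule out) := by unfold Spec_check_colon_star_at_end_py; infer_instance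

-- ===== CLAIM (what is proved, stated in full; the proofs are below) =====
def Claim_equal_check_colon_star_at_end_py : Prop := ∀ (rule : String), Dom_check_colon_star_at_end_py rule → Spec_check_colon_star_at_end_py rule (check_colon_star_at_end_py rule)

-- ===== LEMMAS AND PROOFS =====

-- facts about a successful find: it starts at or after idx and ends within the string
theorem pvFindFrom_le_length (s sub : List Char) (k : Nat)
    (h : PySem.Chars.findFrom s sub (k:Int) none ≠ -1) : k ≤ s.length := by
  by_contra hk
  unfold PySem.Chars.findFrom at h
  simp at h
  omega

theorem pvFindFrom_facts (s sub : List Char) (k : Nat)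
    (h : PySem.Chars.findFrom s sub (k:Int) none ≠ -1) :
    k ≤ (PySem.Chars.findFrom s sub (k:Int) none).toNat ∧
    sub <+: s.drop (PySem.Chars.findFrom s sub (k:Int) none).toNat ∧
    ∀ i, k ≤ i → i < (PySem.Chars.findFrom s sub (k:Int) none).toNat → ¬ sub <+: s.drop i := by
  have hk := pvFindFrom_le_length s sub k h
  obtain ⟨h1, h2, h3⟩ := PySem.Chars.findFrom_natCast_spec s sub k hk h
  exact ⟨by omega, h2, h3⟩

theorem pvFindFrom_end_le (s : List Char) (k : Nat)
    (h : PySem.Chars.findFrom s [':', '*'] (k:Int) none ≠ -1) :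
    (PySem.Chars.findFrom s [':', '*'] (k:Int) none).toNat + 2 ≤ s.length := by
  obtain ⟨-, h2, -⟩ := pvFindFrom_facts s [':', '*'] k h
  have := h2.length_le
  simp [List.length_drop] at this
  omega


-- reference predicate: scan the string once; after each ":*" the next char (if any) must be ')' or '"'
def pvOk : List Char → Bool
  | [] => true
  | c :: rest =>
    if c = ':' ∧ rest.head? = some '*' then
      match rest.tail with
      | [] => true
      | d :: _ => (d = ')' || d = '"') && pvOk rest.tail
    else pvOk rest
termination_by l => l.length
decreasing_by all_goals (simp [List.length_tail]; try omega)

theorem pv_prefix_iff (c : Char) (rest : List Char) :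
    [':', '*'] <+: (c :: rest) ↔ (c = ':' ∧ rest.head? = some '*') := by
  cases rest with
  | nil => simp [List.IsPrefix]
  | cons d t =>
    constructor
    · rintro ⟨u, hu⟩
      simp at hu
      exact ⟨hu.1.symm, by simp [hu.2.1.symm]⟩
    · rintro ⟨hc, hd⟩
      simp at hd
      exact ⟨t, by simp [hc, hd]⟩

theorem pvOk_of_no_infix (l : List Char) (h : ¬ [':', '*'] <:+: l) : pvOk l = true := by
  induction l with
  | nil => simp [pvOk]
  | cons c rest ih =>
    have hnp : ¬ (c = ':' ∧ rest.head? = some '*') := by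
      intro hc
      exact h ((pv_prefix_iff c rest).2 hc).isInfix
    rw [pvOk]
    simp only [hnp, if_false]
    exact ih (fun hi => h (List.infix_cons hi))

theorem pvOk_skip (s : List Char) (n k p : Nat) (hkp : k ≤ p) (hn : p - k ≤ n)
    (hmin : ∀ i, k ≤ i → i < p → ¬ [':', '*'] <+: s.drop i) :
    pvOk (s.drop k) = pvOk (s.drop p) := by
  induction n generalizing k with
  | zero => have : k = p := by omega
            rw [this]
  | succ n ih =>
    rcases Nat.eq_or_lt_of_le hkp with heq | hlt
    · rw [heq]
    · by_cases hlen : s.length ≤ k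
      · rw [List.drop_eq_nil_of_le hlen, List.drop_eq_nil_of_le (le_trans hlen hkp)]
      · rw [not_le] at hlen
        have hdk : s.drop k = s[k] :: s.drop (k + 1) := List.drop_eq_getElem_cons hlen
        have hnp : ¬ (s[k] = ':' ∧ (s.drop (k+1)).head? = some '*') := by
          intro hc
          exact hmin k le_rfl hlt (by rw [hdk]; exact (pv_prefix_iff _ _).2 hc)
        have hstep : pvOk (s.drop k) = pvOk (s.drop (k+1)) := by
          rw [hdk, pvOk]
          simp only [hnp, if_false]
        rw [hstep]
        exact ih (k+1) hlt (by omega) (fun i h1 h2 => hmin i (by omega) h2)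

theorem pvOk_colon_star (t : List Char) :
    pvOk (':' :: '*' :: t) =
      (match t with
       | [] => true
       | d :: _ => (d = ')' || d = '"') && pvOk t) := by
  rw [pvOk]
  simp

theorem pvALoop_eq_ok (s : List Char) (n k : Nat) (hn : s.length + 2 - k ≤ n) :
    pvALoop s n k = pvOk (s.drop k) := by
  induction n generalizing k with
  | zero =>
    rw [pvALoop]
    rw [List.drop_eq_nil_of_le (by omega)]
    simp [pvOk]
  | succ n ih =>
    rw [pvALoop]
    by_cases h : PySem.Chars.findFrom s [':', '*'] (k:Int) none = -1
    · simp only [h, if_pos]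
      by_cases hk : k ≤ s.length
      · have hno : ¬ [':', '*'] <:+: s.drop k :=
          (PySem.Chars.findFrom_natCast_eq_neg_one_iff s [':', '*'] k hk).1 h
        exact (pvOk_of_no_infix _ hno).symm
      · rw [List.drop_eq_nil_of_le (by omega)]
        simp [pvOk]
    · simp only [h, if_neg, not_false_iff]
      obtain ⟨h1, h2, h3⟩ := pvFindFrom_facts s [':', '*'] k h
      have hend := pvFindFrom_end_le s k h
      set p := (PySem.Chars.findFrom s [':', '*'] (k:Int) none).toNat with hp
      have hskip : pvOk (s.drop k) = pvOk (s.drop p) :=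
        pvOk_skip s (p - k) k p h1 le_rfl h3
      obtain ⟨t, ht⟩ := h2
      have hdp2 : s.drop (p + 2) = t := by
        have h22 : s.drop (p + 2) = (s.drop p).drop 2 := by
          rw [List.drop_drop]
        rw [h22, ← ht]
        simp
      have hdp : s.drop p = ':' :: '*' :: s.drop (p + 2) := by
        rw [hdp2, ← ht]
        simp
      have hokp : pvOk (s.drop p) =
          (match s.drop (p + 2) with
           | [] => true
           | d :: _ => (d = ')' || d = '"') && pvOk (s.drop (p + 2))) := by
        rw [hdp, pvOk_colon_star]
      by_cases h2lt : p + 2 < s.length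
      · simp only [h2lt, dif_pos]
        have hdcons : s.drop (p + 2) = s[p + 2] :: s.drop (p + 3) := List.drop_eq_getElem_cons h2lt
        have hrec : pvALoop s n (p + 2) = pvOk (s.drop (p + 2)) := ih (p + 2) (by omega)
        rw [hskip, hokp, hdcons]
        cases hgood : (s[p + 2] = ')' || s[p + 2] = '"') with
        | false => simp [hgood]
        | true => simp [hgood, hrec, ← hdcons]
      · simp only [h2lt, dif_neg, not_false_iff]
        have hrec : pvALoop s n (p + 2) = pvOk (s.drop (p + 2)) := ih (p + 2) (by omega)
        have hnil : s.drop (p + 2) = [] := List.drop_eq_nil_of_le (by omega)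
        rw [hskip, hokp, hnil, hrec, hnil]
        simp [pvOk]

-- splitOn.go bookkeeping
theorem pvGo_nil (sep : List Char) (fuel : Nat) (cur : List Char) (acc : List (List Char)) :
    PySem.Chars.splitOn.go sep fuel [] cur acc = (cur.reverse :: acc).reverse := by
  cases fuel <;> simp [PySem.Chars.splitOn.go]

theorem pvGo_acc (sep : List Char) (fuel : Nat) (l cur : List Char) (acc : List (List Char)) :
    PySem.Chars.splitOn.go sep fuel l cur acc = acc.reverse ++ PySem.Chars.splitOn.go sep fuel l cur [] := by
  induction fuel generalizing l cur acc with
  | zero => simp [PySem.Chars.splitOn.go]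
  | succ fuel ih =>
    cases l with
    | nil => simp [pvGo_nil]
    | cons c rest =>
      by_cases hp : sep.isPrefixOf (c :: rest)
      · rw [PySem.Chars.splitOn.go, if_pos hp, PySem.Chars.splitOn.go, if_pos hp,
          ih _ _ (cur.reverse :: acc), ih _ _ [cur.reverse]]
        simp
      · rw [PySem.Chars.splitOn.go, if_neg hp, PySem.Chars.splitOn.go, if_neg hp, ih]

theorem pvGo_cur (sep : List Char) (fuel : Nat) (l : List Char) :
    ∃ hd tl, PySem.Chars.splitOn.go sep fuel l [] [] = hd :: tl ∧
      ∀ cur, PySem.Chars.splitOn.go sep fuel l cur [] = (cur.reverse ++ hd) :: tl := by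
  induction fuel generalizing l with
  | zero =>
    refine ⟨l, [], ?_, fun cur => ?_⟩ <;> simp [PySem.Chars.splitOn.go]
  | succ fuel ih =>
    cases l with
    | nil =>
      refine ⟨[], [], ?_, fun cur => ?_⟩ <;> simp [pvGo_nil]
    | cons c rest =>
      by_cases hp : sep.isPrefixOf (c :: rest)
      · refine ⟨[], PySem.Chars.splitOn.go sep fuel (List.drop sep.length (c :: rest)) [] [], ?_, fun cur => ?_⟩
        · rw [PySem.Chars.splitOn.go, if_pos hp, pvGo_acc]
          simp
        · rw [PySem.Chars.splitOn.go, if_pos hp, pvGo_acc]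
          simp
      · obtain ⟨hd, tl, h1, h2⟩ := ih rest
        refine ⟨c :: hd, tl, ?_, fun cur => ?_⟩
        · rw [PySem.Chars.splitOn.go, if_neg hp, h2 [c]]
          simp
        · rw [PySem.Chars.splitOn.go, if_neg hp, h2 (c :: cur)]
          simp

theorem pvGo_fuel (sep : List Char) (hsep : sep ≠ []) (fuel fuel' : Nat) (l cur : List Char)
    (acc : List (List Char)) (hf : l.length ≤ fuel) (hf' : l.length ≤ fuel') :
    PySem.Chars.splitOn.go sep fuel l cur acc = PySem.Chars.splitOn.go sep fuel' l cur acc := by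
  induction fuel generalizing fuel' l cur acc with
  | zero =>
    have : l = [] := by cases l <;> simp_all
    subst this
    rw [pvGo_nil, pvGo_nil]
  | succ fuel ih =>
    cases l with
    | nil => rw [pvGo_nil, pvGo_nil]
    | cons c rest =>
      cases fuel' with
      | zero => simp at hf'
      | succ fuel' =>
        by_cases hp : sep.isPrefixOf (c :: rest)
        · rw [PySem.Chars.splitOn.go, if_pos hp, PySem.Chars.splitOn.go, if_pos hp]
          have hsl : 1 ≤ sep.length := by cases sep <;> simp_all
          have hdl : (List.drop sep.length (c :: rest)).length ≤ rest.length := by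
            simp only [List.length_drop, List.length_cons]
            omega
          exact ih fuel' _ _ _ (by simp at hf; omega) (by simp at hf'; omega)
        · rw [PySem.Chars.splitOn.go, if_neg hp, PySem.Chars.splitOn.go, if_neg hp]
          exact ih fuel' _ _ _ (by simp at hf; omega) (by simp at hf'; omega)

theorem pvGo_eq_splitOn (sep : List Char) (hsep : sep ≠ []) (fuel : Nat) (l : List Char)
    (hf : l.length ≤ fuel) :
    PySem.Chars.splitOn.go sep fuel l [] [] = PySem.Chars.splitOn l sep := by
  unfold PySem.Chars.splitOn
  exact pvGo_fuel sep hsep fuel (l.length + 1) l [] [] hf (by omega)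

theorem pvSplit_nil : PySem.Chars.splitOn [] [':', '*'] = [[]] := by
  unfold PySem.Chars.splitOn
  simp [pvGo_nil]

theorem pvSplit_pos (m : List Char) :
    PySem.Chars.splitOn (':' :: '*' :: m) [':', '*'] = [] :: PySem.Chars.splitOn m [':', '*'] := by
  unfold PySem.Chars.splitOn
  simp only [List.length_cons]
  rw [PySem.Chars.splitOn.go, if_pos (by simp [List.isPrefixOf])]
  simp only [List.length_cons, List.drop_succ_cons]
  rw [pvGo_acc]
  simp only [List.reverse_cons, List.reverse_nil, List.nil_append, List.singleton_append,
    List.cons.injEq, true_and]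
  exact pvGo_eq_splitOn [':', '*'] (by simp) (m.length + 2) m (by omega)

theorem pvSplit_neg (c : Char) (m : List Char) (hp : ¬ [':', '*'].isPrefixOf (c :: m)) :
    ∃ hd tl, PySem.Chars.splitOn m [':', '*'] = hd :: tl ∧
      PySem.Chars.splitOn (c :: m) [':', '*'] = (c :: hd) :: tl := by
  obtain ⟨hd, tl, h1, h2⟩ := pvGo_cur [':', '*'] (m.length + 1) m
  refine ⟨hd, tl, ?_, ?_⟩
  · rw [← pvGo_eq_splitOn [':', '*'] (by simp) (m.length + 1) m (by omega)]
    exact h1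
  · unfold PySem.Chars.splitOn
    simp only [List.length_cons]
    rw [PySem.Chars.splitOn.go, if_neg hp, h2 [c]]
    simp

theorem pvBGo_eq_ok (n : Nat) (l : List Char) (hn : l.length ≤ n) :
    pvBGo ((PySem.Chars.splitOn l [':', '*']).drop 1) = pvOk l := by
  induction n generalizing l with
  | zero =>
    have : l = [] := by cases l <;> simp_all
    subst this
    simp [pvSplit_nil, pvBGo, pvOk]
  | succ n ih =>
    cases l with
    | nil => simp [pvSplit_nil, pvBGo, pvOk]
    | cons c rest =>
      by_cases hp : [':', '*'].isPrefixOf (c :: rest)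
      · have hcr : c = ':' ∧ rest.head? = some '*' :=
          (pv_prefix_iff c rest).1 (List.isPrefixOf_iff_prefix.1 hp)
        obtain ⟨m, hm⟩ : ∃ m, rest = '*' :: m := by
          cases rest with
          | nil => simp at hcr
          | cons d t => exact ⟨t, by simp_all⟩
        subst hm
        rw [hcr.1, pvSplit_pos, pvOk_colon_star]
        simp only [List.drop_succ_cons, List.drop_zero]
        cases m with
        | nil => simp [pvSplit_nil, pvBGo]
        | cons d m' =>
          by_cases hp2 : [':', '*'].isPrefixOf (d :: m')
          · have hdm : d = ':' ∧ m'.head? = some '*' :=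
              (pv_prefix_iff d m').1 (List.isPrefixOf_iff_prefix.1 hp2)
            obtain ⟨m2, hm2⟩ : ∃ m2, m' = '*' :: m2 := by
              cases m' with
              | nil => simp at hdm
              | cons e t => exact ⟨t, by simp_all⟩
            subst hm2
            rw [hdm.1, pvSplit_pos]
            obtain ⟨hd2, tl2, hsplit2, -⟩ := pvGo_cur [':', '*'] (m2.length + 1) m2
            have hsp : PySem.Chars.splitOn m2 [':', '*'] = hd2 :: tl2 := hsplit2
            simp [pvBGo, hsp]
          · obtain ⟨hd2, tl2, h1, h2⟩ := pvSplit_neg d m' hp2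
            rw [h2]
            have hnp2 : ¬ (d = ':' ∧ m'.head? = some '*') := fun hc =>
              hp2 (List.isPrefixOf_iff_prefix.2 ((pv_prefix_iff d m').2 hc))
            have hih : pvBGo tl2 = pvOk m' := by
              have := ih m' (by simp at hn; omega)
              rw [h1] at this
              simpa using this
            have hok : pvOk (d :: m') = pvOk m' := by
              rw [pvOk]
              simp [hnp2]
            rw [hok]
            cases hgood : (d = ')' || d = '"') <;> simp [pvBGo, hgood, hih]
      · obtain ⟨hd, tl, h1, h2⟩ := pvSplit_neg c rest hp
        rw [h2]
        have hnp : ¬ (c = ':' ∧ rest.head? = some '*') := fun hc =>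
          hp (List.isPrefixOf_iff_prefix.2 ((pv_prefix_iff c rest).2 hc))
        have hih : pvBGo tl = pvOk rest := by
          have := ih rest (by simp at hn; omega)
          rw [h1] at this
          simpa using this
        have hok : pvOk (c :: rest) = pvOk rest := by
          rw [pvOk]
          simp [hnp]
        rw [hok, ← hih]
        cases hd with
        | nil => simp
        | cons e t => cases hgood : (e = ')' || e = '"') <;> simp [pvBGo]

-- ===== VERDICT (by name: the statement is the Claim_ definition above) =====
theorem check_colon_star_at_end_py_spec : Claim_equal_check_colon_star_at_end_py := by
  intro rule _
  unfold Spec_check_colon_star_at_end_py check_colon_star_at_end_py check_colon_star_at_end_py_alt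
  rw [pvALoop_eq_ok rule.toList (rule.toList.length + 2) 0 (by omega), List.drop_zero,
    ← pvBGo_eq_ok rule.toList.length rule.toList le_rfl]
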